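-- pv_equiv track=rewrite | github.com/shyamraj7292/SSH-Cracker | advance_ssh_brute.py | generate_from_pattern
-- ===== SOURCE A (Python) =====
-- from typing import List, Optional, Tuple, Generator
--
-- def generate_from_pattern(pattern: str) -> Generator[str, None, None]:
--     """
--     Generate passwords from a pattern.
--     %d = digit, %a = lowercase letter, %A = uppercase letter, %s = special char
--
--     Args:
--         pattern: Pattern string (e.g., "pass%d%d" generates pass00, pass01, etc.)
--     """
--     # Simple pattern replacement
--     if '%d' in pattern:
--         # Replace %d with digits
--         digit_count = pattern.count('%d')
--         for num in range(10 ** digit_count):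
--             num_str = str(num).zfill(digit_count)
--             password = pattern
--             for _ in range(digit_count):
--                 password = password.replace('%d', num_str[0], 1)
--                 num_str = num_str[1:]
--             yield password
--     else:
--         yield pattern
-- ===== SOURCE B (Python) =====
-- def generate_from_pattern(pattern):
--     """Generate passwords from a pattern: split once on '%d' and interleave
--     literal segments with digits, recursing over the segments."""
--     parts = pattern.split('%d')
--
--     def gen(i):
--         if i == len(parts) - 1:
--             yield parts[i]
--         else:
--             for c in '0123456789':
--                 for rest in gen(i + 1):
--                     yield parts[i] + c + rest
--
--     yield from gen(0)
-- ===== Notes on version B (the rewrite author's own statement) =====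
-- stated objective: alternative
-- what changed: A counts the digit placeholders, loops num over range(10**count) and builds each password by zfill plus repeated first-occurrence replace; B splits the pattern once on the placeholder and recurses over the literal segments, interleaving them with digit characters.
import Mathlib
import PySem

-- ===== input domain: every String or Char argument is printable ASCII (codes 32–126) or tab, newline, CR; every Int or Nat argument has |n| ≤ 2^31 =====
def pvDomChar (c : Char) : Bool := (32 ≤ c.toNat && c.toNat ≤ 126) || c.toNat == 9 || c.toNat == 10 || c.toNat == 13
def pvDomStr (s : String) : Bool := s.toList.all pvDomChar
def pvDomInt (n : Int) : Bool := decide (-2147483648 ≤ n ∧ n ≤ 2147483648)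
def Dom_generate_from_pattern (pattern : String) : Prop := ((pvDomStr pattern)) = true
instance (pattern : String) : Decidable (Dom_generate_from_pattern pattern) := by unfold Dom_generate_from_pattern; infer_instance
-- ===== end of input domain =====

-- B replaces A's count/range/zfill/repeated-replace loop by a single split on "%d" and a
-- recursion over the literal segments, interleaving them with digit tuples (objective: alternative).

-- ===== PORT A =====
-- exact hand port of `password.replace('%d', c, 1)` for the fixed two-char needle "%d":
-- replace the first occurrence only; no occurrence leaves the string unchanged.
def pvReplaceOnce : List Char → Char → List Char
  | [], _ => []
  | x :: rest, c =>
    if x = '%' ∧ rest.head? = some 'd' then c :: rest.tail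
    else x :: pvReplaceOnce rest c

def generate_from_pattern (pattern : String) : List String :=
  if PySem.Str.isIn "%d" pattern then
    let digitCount := PySem.Str.count pattern "%d"
    (PySem.List.pyRange 0 ((10 : Int) ^ digitCount) 1).map (fun num =>
      let numStr := PySem.Chars.zfill (PySem.Int.toChars num) (digitCount : Int)
      -- for _ in range(digit_count): password = password.replace('%d', num_str[0], 1); num_str = num_str[1:]
      -- num_str[0]: the string is provably nonempty on every iteration, Python never raises here
      let st := (PySem.List.pyRange 0 (digitCount : Int) 1).foldl
        (fun (st : List Char × List Char) _ =>
          (pvReplaceOnce st.1 ((PySem.List.pyGet? st.2 0).getD '0'),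
           PySem.List.slice st.2 (some 1) none))
        (pattern.toList, numStr)
      String.ofList st.1)
  else [pattern]

-- ===== PORT B =====
def pvDigits : List Char := ['0', '1', '2', '3', '4', '5', '6', '7', '8', '9']

-- port of B's inner generator `gen(i)`, recursing over the suffix parts[i:]
def pvGen : List (List Char) → List (List Char)
  | [] => []
  | [p] => [p]
  | p :: ps => pvDigits.flatMap (fun c => (pvGen ps).map (fun rest => p ++ c :: rest))

def generate_from_pattern_alt (pattern : String) : List String :=
  (pvGen (PySem.Chars.splitOn pattern.toList ['%', 'd'])).map String.ofList

-- ===== PRECONDITION & SPEC =====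
def Spec_generate_from_pattern (pattern : String) (out : List String) : Prop := out = generate_from_pattern_alt pattern
instance (pattern : String) (out : List String) : Decidable (Spec_generate_from_pattern pattern out) := by unfold Spec_generate_from_pattern; infer_instance

-- ===== CLAIM (what is proved, stated in full; the proofs are below) =====
def Claim_equal_generate_from_pattern : Prop := ∀ (pattern : String), Dom_generate_from_pattern pattern → Spec_generate_from_pattern pattern (generate_from_pattern pattern)

-- ===== LEMMAS AND PROOFS =====

def pvParts : List Char → List (List Char)
  | [] => [[]]
  | '%' :: 'd' :: r => [] :: pvParts r
  | x :: r => (pvParts r).modifyHead (x :: ·)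

theorem pvParts_ne_nil (l : List Char) : pvParts l ≠ [] := by
  fun_induction pvParts l with
  | case1 => simp
  | case2 r ih => simp
  | case3 x r h ih => cases hp : pvParts r <;> simp_all [List.modifyHead]

theorem pvParts_sep (r : List Char) : pvParts ('%' :: 'd' :: r) = [] :: pvParts r := rfl

theorem pvParts_cons_of_ne (c : Char) (rest : List Char) (h : ¬ (c = '%' ∧ rest.head? = some 'd')) :
    pvParts (c :: rest) = (pvParts rest).modifyHead (c :: ·) := by
  rw [pvParts.eq_def]
  split
  · simp_all
  · rename_i r heq
    exfalso; apply h
    simp at heq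
    simp [heq.1, heq.2]
  · rename_i heq
    injection heq with h1 h2
    subst h1; subst h2; rfl

theorem pvPrefix_iff (c : Char) (rest : List Char) :
    ['%', 'd'] <+: c :: rest ↔ (c = '%' ∧ rest.head? = some 'd') := by
  cases rest <;> simp [List.cons_prefix_cons, eq_comm]

theorem pvSplitOn_go_eq (fuel : Nat) : ∀ (l cur : List Char) (acc : List (List Char)),
    l.length ≤ fuel →
    PySem.Chars.splitOn.go ['%', 'd'] fuel l cur acc
      = acc.reverse ++ (pvParts l).modifyHead (cur.reverse ++ ·) := by
  induction fuel with
  | zero =>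
    intro l cur acc hl
    have : l = [] := by cases l <;> simp_all
    subst this
    rw [PySem.Chars.splitOn.go.eq_def]
    simp [pvParts]
  | succ fuel ih =>
    intro l cur acc hl
    cases l with
    | nil => rw [PySem.Chars.splitOn.go.eq_def]; simp [pvParts]
    | cons c rest =>
      rw [PySem.Chars.splitOn.go.eq_def]
      dsimp only
      by_cases hp : List.isPrefixOf ['%', 'd'] (c :: rest) = true
      · rw [if_pos hp]
        rw [List.isPrefixOf_iff_prefix, pvPrefix_iff] at hp
        obtain ⟨hc, hh⟩ := hp
        subst hc
        cases rest with
        | nil => simp at hh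
        | cons d' t =>
          simp at hh
          subst hh
          have hdrop : List.drop (['%', 'd'].length) ('%' :: 'd' :: t) = t := rfl
          rw [hdrop, ih t [] (cur.reverse :: acc) (by simp at hl ⊢; omega)]
          rw [pvParts_sep]
          cases hpt : pvParts t <;> simp [List.modifyHead]
      · rw [if_neg hp]
        rw [ih rest (c :: cur) acc (by simp at hl ⊢; omega)]
        rw [List.isPrefixOf_iff_prefix, pvPrefix_iff] at hp
        rw [pvParts_cons_of_ne c rest hp]
        cases hpt : pvParts rest <;> simp [List.modifyHead]

theorem pvSplitOn_eq (l : List Char) : PySem.Chars.splitOn l ['%', 'd'] = pvParts l := by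
  rw [PySem.Chars.splitOn, pvSplitOn_go_eq (l.length + 1) l [] [] (by omega)]
  cases hpt : pvParts l <;> simp [List.modifyHead]

theorem pvCount_go_eq (fuel : Nat) : ∀ (l : List Char) (acc : Nat),
    l.length ≤ fuel →
    PySem.Chars.count.go ['%', 'd'] fuel l acc = acc + ((pvParts l).length - 1) := by
  induction fuel with
  | zero =>
    intro l acc hl
    have : l = [] := by cases l <;> simp_all
    subst this
    rw [PySem.Chars.count.go.eq_def]
    simp [pvParts]
  | succ fuel ih =>
    intro l acc hl
    cases l with
    | nil => rw [PySem.Chars.count.go.eq_def]; simp [pvParts]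
    | cons c rest =>
      rw [PySem.Chars.count.go.eq_def]
      dsimp only
      by_cases hp : List.isPrefixOf ['%', 'd'] (c :: rest) = true
      · rw [if_pos hp]
        rw [List.isPrefixOf_iff_prefix, pvPrefix_iff] at hp
        obtain ⟨hc, hh⟩ := hp
        subst hc
        cases rest with
        | nil => simp at hh
        | cons d' t =>
          simp at hh
          subst hh
          have hdrop : List.drop (['%', 'd'].length) ('%' :: 'd' :: t) = t := rfl
          rw [hdrop, ih t (acc + 1) (by simp at hl ⊢; omega), pvParts_sep]
          have := pvParts_ne_nil t
          cases hpt : pvParts t <;> simp_all; omega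
      · rw [if_neg hp]
        rw [ih rest acc (by simp at hl ⊢; omega)]
        rw [List.isPrefixOf_iff_prefix, pvPrefix_iff] at hp
        rw [pvParts_cons_of_ne c rest hp]
        simp

theorem pvCount_eq (l : List Char) : PySem.Chars.count l ['%', 'd'] = (pvParts l).length - 1 := by
  rw [PySem.Chars.count]
  simp only [List.isEmpty_cons, if_false, Bool.false_eq_true]
  rw [pvCount_go_eq l.length l 0 (by omega)]
  omega

theorem pvSep_infix_iff (l : List Char) : ['%', 'd'] <:+: l ↔ (pvParts l).length ≠ 1 := by
  fun_induction pvParts l with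
  | case1 => simp
  | case2 r ih =>
    have h1 : ['%', 'd'] <:+: '%' :: 'd' :: r := ⟨[], r, by simp⟩
    have := pvParts_ne_nil r
    cases hpt : pvParts r <;> simp_all
  | case3 x r h ih =>
    have hnp : ¬ (x = '%' ∧ r.head? = some 'd') := by
      rintro ⟨h1, h2⟩
      cases r with
      | nil => simp at h2
      | cons y t => simp at h2; exact h t h1 (by rw [h2])
    rw [List.infix_cons_iff, pvPrefix_iff]
    simp only [hnp, false_or]
    rw [ih]
    simp

def pvJoin : List (List Char) → List Char
  | [] => []
  | [p] => p
  | p :: ps => p ++ '%' :: 'd' :: pvJoin ps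

theorem pvJoin_pvParts (l : List Char) : pvJoin (pvParts l) = l := by
  fun_induction pvParts l with
  | case1 => rfl
  | case2 r ih =>
    have hne := pvParts_ne_nil r
    cases hpt : pvParts r with
    | nil => exact absurd hpt hne
    | cons hd tl =>
      rw [hpt] at ih
      show '%' :: 'd' :: pvJoin (hd :: tl) = _
      rw [ih]
  | case3 x r h ih =>
    have hne := pvParts_ne_nil r
    cases hpt : pvParts r with
    | nil => exact absurd hpt hne
    | cons hd tl =>
      rw [hpt] at ih
      simp only [List.modifyHead]
      cases tl with
      | nil => show x :: hd = x :: r; rw [show hd = r from ih]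
      | cons t0 ts =>
        show (x :: hd) ++ '%' :: 'd' :: pvJoin (t0 :: ts) = x :: r
        have : hd ++ '%' :: 'd' :: pvJoin (t0 :: ts) = r := ih
        simp [← this]

theorem pvHead_of_parts {r : List Char} {hd : List Char} {tl : List (List Char)}
    (hpt : pvParts r = hd :: tl) (hne : hd ≠ []) : r.head? = hd.head? := by
  have hj := pvJoin_pvParts r
  rw [hpt] at hj
  cases tl with
  | nil => rw [← hj]; rfl
  | cons t0 ts =>
    have : hd ++ '%' :: 'd' :: pvJoin (t0 :: ts) = r := hj
    rw [← this]
    cases hd with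
    | nil => exact absurd rfl hne
    | cons a b => simp

theorem pvParts_noSep (l : List Char) : ∀ q ∈ pvParts l, ¬ ['%', 'd'] <:+: q := by
  fun_induction pvParts l with
  | case1 => simp
  | case2 r ih =>
    intro q hq
    rcases hq with _ | hq
    · simp
    · exact ih q (by assumption)
  | case3 x r h ih =>
    have hnp : ¬ (x = '%' ∧ r.head? = some 'd') := by
      rintro ⟨h1, h2⟩
      cases r with
      | nil => simp at h2
      | cons y t => simp at h2; exact h t h1 (by rw [h2])
    have hne := pvParts_ne_nil r
    intro q hq
    cases hpt : pvParts r with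
    | nil => exact absurd hpt hne
    | cons hd tl =>
      rw [hpt] at hq
      simp only [List.modifyHead] at hq
      rw [List.mem_cons] at hq
      rcases hq with hq | hq
      · subst hq
        rw [List.infix_cons_iff, pvPrefix_iff]
        rintro (hp | hin)
        · refine hnp ⟨hp.1, ?_⟩
          have hh : hd.head? = some 'd' := hp.2
          have hdne : hd ≠ [] := by intro hc; rw [hc] at hh; simp at hh
          rw [pvHead_of_parts hpt hdne, hh]
        · exact ih hd (by rw [hpt]; simp) hin
      · exact ih q (by rw [hpt]; exact List.mem_cons_of_mem _ hq)

theorem pvParts_of_noSep (l : List Char) (h : ¬ ['%', 'd'] <:+: l) : pvParts l = [l] := by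
  have h1 : (pvParts l).length = 1 := by
    by_contra hc
    exact h ((pvSep_infix_iff l).2 hc)
  obtain ⟨a, ha⟩ := List.length_eq_one_iff.1 h1
  have := pvJoin_pvParts l
  rw [ha] at this ⊢
  rw [show pvJoin [a] = a from rfl] at this
  rw [this]

theorem pvNoSep_single (c : Char) : ¬ ['%', 'd'] <:+: [c] := by
  intro h
  have := h.length_le
  simp at this

theorem pvNoSep_append {a b : List Char} (ha : ¬ ['%', 'd'] <:+: a) (hb : ¬ ['%', 'd'] <:+: b)
    (hbd : ¬ (a.getLast? = some '%' ∧ b.head? = some 'd')) : ¬ ['%', 'd'] <:+: (a ++ b) := by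
  induction a with
  | nil => simpa using hb
  | cons x a' ih =>
    rw [List.cons_append, List.infix_cons_iff, pvPrefix_iff]
    rintro (⟨hx, hh⟩ | hin)
    · subst hx
      cases a' with
      | nil =>
        simp at hh
        exact hbd ⟨rfl, hh⟩
      | cons y t =>
        simp at hh
        subst hh
        exact ha ⟨[], t, rfl⟩
    · refine ih ?_ ?_ hin
      · intro hc; exact ha (List.infix_cons hc)
      · intro ⟨h1, h2⟩
        cases a' with
        | nil => exact hbd ⟨by simp_all, h2⟩
        | cons y t => exact hbd ⟨by rwa [List.getLast?_cons_cons], h2⟩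


theorem pvReplaceOnce_at {u : List Char} (v : List Char) (c : Char) (hu : ¬ ['%', 'd'] <:+: u) :
    pvReplaceOnce (u ++ '%' :: 'd' :: v) c = u ++ c :: v := by
  induction u with
  | nil => simp [pvReplaceOnce]
  | cons x u' ih =>
    rw [List.cons_append, pvReplaceOnce]
    have hcond : ¬ (x = '%' ∧ (u' ++ '%' :: 'd' :: v).head? = some 'd') := by
      rintro ⟨hx, hh⟩
      subst hx
      cases u' with
      | nil => simp at hh
      | cons y t =>
        simp at hh
        subst hh
        exact hu ⟨[], t, rfl⟩
    rw [if_neg hcond, ih (fun hc => hu (List.infix_cons hc))]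
    simp

def pvInter : List (List Char) → List Char → List Char
  | [], _ => []
  | p :: _, [] => p
  | p :: ps, c :: ds => p ++ c :: pvInter ps ds

theorem pvLoopA (L : List Int) : ∀ (ps : List (List Char)) (ds acc : List Char),
    L.length = ds.length → ps.length = ds.length + 1 →
    (∀ q ∈ ps, ¬ ['%', 'd'] <:+: q) → (∀ c ∈ ds, c ≠ '%' ∧ c ≠ 'd') →
    (¬ ['%', 'd'] <:+: acc) → (∀ c₀, acc.getLast? = some c₀ → c₀ ≠ '%') →
    (L.foldl (fun (st : List Char × List Char) _ =>
        (pvReplaceOnce st.1 ((PySem.List.pyGet? st.2 0).getD '0'),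
         PySem.List.slice st.2 (some 1) none)) (acc ++ pvJoin ps, ds)).1
      = acc ++ pvInter ps ds := by
  induction L with
  | nil =>
    intro ps ds acc hL hps hnos hdig hacc hlast
    have hds : ds = [] := by cases ds <;> simp_all
    subst hds
    obtain ⟨p, hp⟩ := List.length_eq_one_iff.1 (by simpa using hps)
    subst hp
    simp [pvJoin, pvInter, List.foldl]
  | cons _ L' ih =>
    intro ps ds acc hL hps hnos hdig hacc hlast
    cases ds with
    | nil => simp at hL
    | cons c ds' =>
      cases ps with
      | nil => simp at hps
      | cons p ps' =>
        cases ps' with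
        | nil => simp at hps
        | cons h t =>
          rw [List.foldl_cons]
          have hget : (PySem.List.pyGet? (c :: ds') 0).getD '0' = c := by
            simp [PySem.List.pyGet?, PySem.List.pyIdx?]
          have hslice : PySem.List.slice (c :: ds') (some 1) none = ds' := by
            rw [PySem.List.slice_from (c :: ds') (a := 1) (by omega)]
            simp
          have hjoin : pvJoin (p :: h :: t) = p ++ '%' :: 'd' :: pvJoin (h :: t) := rfl
          have hnoaccp : ¬ ['%', 'd'] <:+: (acc ++ p) :=
            pvNoSep_append hacc (hnos p (by simp)) (by
              rintro ⟨h1, _⟩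
              exact hlast '%' h1 rfl)
          have hrep : pvReplaceOnce (acc ++ pvJoin (p :: h :: t)) c
              = acc ++ p ++ c :: pvJoin (h :: t) := by
            rw [hjoin, show acc ++ (p ++ '%' :: 'd' :: pvJoin (h :: t))
                  = (acc ++ p) ++ '%' :: 'd' :: pvJoin (h :: t) by simp]
            rw [pvReplaceOnce_at _ c hnoaccp]
          rw [hget, hslice, hrep]
          have hc := hdig c (by simp)
          have := ih (h :: t) ds' (acc ++ p ++ [c])
            (by simp_all) (by simp_all)
            (fun q hq => hnos q (List.mem_cons_of_mem _ hq))
            (fun c' hc' => hdig c' (List.mem_cons_of_mem _ hc'))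
            (pvNoSep_append hnoaccp (pvNoSep_single c) (by
              rintro ⟨_, h2⟩
              simp at h2
              exact hc.2 h2))
            (by
              intro c₀ hc₀
              rw [List.getLast?_concat] at hc₀
              cases hc₀
              exact hc.1)
          rw [show acc ++ p ++ c :: pvJoin (h :: t) = (acc ++ p ++ [c]) ++ pvJoin (h :: t) by simp] at *
          rw [this]
          simp [pvInter]



def pvTuples : Nat → List (List Char)
  | 0 => [[]]
  | d + 1 => pvDigits.flatMap (fun c => (pvTuples d).map (c :: ·))

theorem pvGen_eq_tuples : ∀ (ps : List (List Char)), ps ≠ [] →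
    pvGen ps = (pvTuples (ps.length - 1)).map (pvInter ps) := by
  intro ps
  induction ps with
  | nil => intro h; exact absurd rfl h
  | cons p ps' ih =>
    intro _
    cases ps' with
    | nil => simp [pvGen, pvTuples, pvInter]
    | cons h t =>
      have hg : pvGen (p :: h :: t) = pvDigits.flatMap
          (fun c => (pvGen (h :: t)).map (fun rest => p ++ c :: rest)) := rfl
      rw [hg, ih (by simp)]
      have hlen : (p :: h :: t).length - 1 = ((h :: t).length - 1) + 1 := by simp
      rw [hlen, pvTuples]
      rw [List.map_flatMap]
      congr 1
      funext c
      simp only [List.map_map]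
      congr 1

def pvPad : Nat → Nat → List Char
  | 0, _ => []
  | d + 1, n => pvPad d (n / 10) ++ [Nat.digitChar (n % 10)]

theorem pvRange_mul (k m : Nat) :
    List.range (k * m) = (List.range k).flatMap (fun i => (List.range m).map (fun r => i * m + r)) := by
  induction k with
  | zero => simp
  | succ k ih =>
    rw [Nat.succ_mul, List.range_add, ih, List.range_succ, List.flatMap_append]
    simp [Nat.mul_comm]

theorem pvPad_split (d : Nat) : ∀ (i r : Nat), i < 10 → r < 10 ^ d →
    pvPad (d + 1) (i * 10 ^ d + r) = Nat.digitChar i :: pvPad d r := by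
  induction d with
  | zero =>
    intro i r hi hr
    have : r = 0 := by omega
    subst this
    simp [pvPad, Nat.mod_eq_of_lt hi]
  | succ d ih =>
    intro i r hi hr
    have h1 : i * 10 ^ (d + 1) + r = 10 * (i * 10 ^ d) + r := by ring
    rw [pvPad, h1, Nat.mul_add_div (by omega), Nat.mul_add_mod]
    have h2 : r / 10 < 10 ^ d := by
      have := Nat.pow_succ 10 d
      omega
    rw [ih i (r / 10) hi h2]
    simp [pvPad]

theorem pvRange_pad (d : Nat) : (List.range (10 ^ d)).map (pvPad d) = pvTuples d := by
  induction d with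
  | zero => simp [pvPad, pvTuples]
  | succ d ih =>
    have h10 : (10 : Nat) ^ (d + 1) = 10 * 10 ^ d := by ring
    rw [h10, pvRange_mul, List.map_flatMap]
    have hdig : pvDigits = (List.range 10).map Nat.digitChar := by decide
    rw [pvTuples, hdig, List.flatMap_map]
    rw [List.flatMap_def, List.flatMap_def]
    congr 1
    apply List.map_congr_left
    intro i hi
    rw [List.map_map, ← ih, List.map_map]
    apply List.map_congr_left
    intro r hr
    simp only [Function.comp_apply]
    exact pvPad_split d i r (List.mem_range.1 hi) (List.mem_range.1 hr)

def pvMyto (n : Nat) : List Char :=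
  if n < 10 then [Nat.digitChar n] else pvMyto (n / 10) ++ [Nat.digitChar (n % 10)]
  decreasing_by exact Nat.div_lt_self (by omega) (by norm_num)

theorem pvTdc_acc (f : Nat) : ∀ (n : Nat) (acc : List Char),
    Nat.toDigitsCore 10 f n acc = Nat.toDigitsCore 10 f n [] ++ acc := by
  induction f with
  | zero => intro n acc; simp [Nat.toDigitsCore]
  | succ f ih =>
    intro n acc
    simp only [Nat.toDigitsCore]
    by_cases h : n / 10 = 0
    · simp [h]
    · rw [if_neg h, if_neg h, ih (n / 10) (Nat.digitChar (n % 10) :: acc),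
        ih (n / 10) [Nat.digitChar (n % 10)]]
      simp

theorem pvMyto_eq_toDigits (f : Nat) : ∀ (n : Nat), n < f → Nat.toDigitsCore 10 f n [] = pvMyto n := by
  induction f with
  | zero => intro n h; omega
  | succ f ih =>
    intro n h
    simp only [Nat.toDigitsCore]
    by_cases h10 : n < 10
    · have : n / 10 = 0 := Nat.div_eq_of_lt h10
      rw [if_pos this, pvMyto, if_pos h10, Nat.mod_eq_of_lt h10]
    · have hne : ¬ n / 10 = 0 := by
        intro hc
        exact h10 (by omega)
      rw [if_neg hne, pvTdc_acc, ih (n / 10) (by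
        have := Nat.div_lt_self (show 0 < n by omega) (show 1 < 10 by norm_num)
        omega)]
      have hm : pvMyto n = pvMyto (n / 10) ++ [Nat.digitChar (n % 10)] := by
        rw [pvMyto]; rw [if_neg h10]
      rw [hm]

theorem pvDigitChar_ok (k : Nat) (hk : k < 10) :
    Nat.digitChar k ≠ '+' ∧ Nat.digitChar k ≠ '-' ∧ Nat.digitChar k ≠ '%' ∧ Nat.digitChar k ≠ 'd' := by
  interval_cases k <;> decide

theorem pvMyto_head (n : Nat) : ∃ k, k < 10 ∧ (pvMyto n).head? = some (Nat.digitChar k) := by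
  fun_induction pvMyto n with
  | case1 n h => exact ⟨n, h, rfl⟩
  | case2 n h ih =>
    obtain ⟨k, hk, hh⟩ := ih
    refine ⟨k, hk, ?_⟩
    rw [List.head?_append, hh]
    rfl

theorem pvPad_zero (d : Nat) : pvPad d 0 = List.replicate d '0' := by
  induction d with
  | zero => rfl
  | succ d ih =>
    rw [pvPad, Nat.zero_div, ih, List.replicate_succ']
    rfl

theorem pvReplicate_myto (d : Nat) : ∀ n, n < 10 ^ d → 0 < d →
    List.replicate (d - (pvMyto n).length) '0' ++ pvMyto n = pvPad d n := by
  induction d with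
  | zero => intro n _ h; omega
  | succ d ih =>
    intro n hn _
    by_cases h10 : n < 10
    · rw [pvMyto, if_pos h10]
      rw [pvPad.eq_2, Nat.div_eq_of_lt h10, Nat.mod_eq_of_lt h10, pvPad_zero]
      simp
    · have hd1 : 0 < d := by
        rcases Nat.eq_zero_or_pos d with h | h
        · subst h; simp at hn; omega
        · exact h
      rw [pvMyto, if_neg h10]
      have hlen : (pvMyto (n / 10) ++ [Nat.digitChar (n % 10)]).length = (pvMyto (n / 10)).length + 1 := by simp
      rw [hlen]
      have hdiv : n / 10 < 10 ^ d := by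
        rw [Nat.pow_succ] at hn
        omega
      rw [pvPad, ← ih (n / 10) hdiv hd1]
      rw [show d + 1 - ((pvMyto (n / 10)).length + 1) = d - (pvMyto (n / 10)).length by omega]
      simp

theorem pvZfill_digits (cs : List Char) (d : Nat) (x : Char) (cs' : List Char)
    (hx : cs = x :: cs') (h1 : x ≠ '+') (h2 : x ≠ '-') :
    PySem.Chars.zfill cs (d : Int) = List.replicate (d - cs.length) '0' ++ cs := by
  rw [PySem.Chars.zfill.eq_def]
  by_cases h : (d : Int) ≤ (cs.length : Int)
  · rw [if_pos h]
    have : d - cs.length = 0 := by omega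
    rw [this]
    rfl
  · rw [if_neg h]
    subst hx
    have hcond : ¬ (x = '+' ∨ x = '-') := by tauto
    simp only [hcond, if_false]
    have : (d : Int).toNat = d := Int.toNat_natCast d
    rw [this]

theorem pvZfill_pad (d n : Nat) (hn : n < 10 ^ d) (hd : 0 < d) :
    PySem.Chars.zfill (PySem.Int.toChars (n : Int)) (d : Int) = pvPad d n := by
  have htc : PySem.Int.toChars (n : Int) = pvMyto n := by
    rw [PySem.Int.toChars]
    rw [if_neg (by omega)]
    rw [show ((n : Int)).toNat = n from Int.toNat_natCast n]
    rw [Nat.toDigits]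
    exact pvMyto_eq_toDigits (n + 1) n (by omega)
  rw [htc]
  obtain ⟨k, hk, hh⟩ := pvMyto_head n
  obtain ⟨cs', hcs⟩ : ∃ cs', pvMyto n = Nat.digitChar k :: cs' := by
    cases hm : pvMyto n with
    | nil => rw [hm] at hh; simp at hh
    | cons a b =>
      rw [hm] at hh
      simp at hh
      exact ⟨b, by rw [hh]⟩
  have hok := pvDigitChar_ok k hk
  rw [pvZfill_digits (pvMyto n) d (Nat.digitChar k) cs' hcs hok.1 hok.2.1]
  exact pvReplicate_myto d n hn hd

theorem pvPad_len (d : Nat) : ∀ n, (pvPad d n).length = d := by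
  induction d with
  | zero => intro n; rfl
  | succ d ih => intro n; simp [pvPad, ih]

theorem pvPad_ok (d : Nat) : ∀ n, ∀ c ∈ pvPad d n, c ≠ '%' ∧ c ≠ 'd' := by
  induction d with
  | zero => intro n c hc; simp [pvPad] at hc
  | succ d ih =>
    intro n c hc
    rw [pvPad] at hc
    rcases List.mem_append.1 hc with h | h
    · exact ih (n / 10) c h
    · have : c = Nat.digitChar (n % 10) := by simpa using h
      subst this
      have := pvDigitChar_ok (n % 10) (Nat.mod_lt n (by omega))
      exact ⟨this.2.2.1, this.2.2.2⟩


theorem pv_main (pattern : String) : generate_from_pattern pattern = generate_from_pattern_alt pattern := by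
  unfold generate_from_pattern generate_from_pattern_alt
  rw [pvSplitOn_eq]
  have h2d : ("%d" : String).toList = ['%', 'd'] := by decide
  by_cases hin : ['%', 'd'] <:+: pattern.toList
  · have hisin : PySem.Str.isIn "%d" pattern = true := by
      rw [PySem.Str.isIn_iff_infix, h2d]; exact hin
    rw [if_pos hisin]
    dsimp only
    have hcnt : PySem.Str.count pattern "%d" = (pvParts pattern.toList).length - 1 := by
      rw [PySem.Str.count_eq, h2d, pvCount_eq]
    set ps := pvParts pattern.toList with hps
    set d := ps.length - 1 with hd
    have hne : ps ≠ [] := pvParts_ne_nil _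
    have hlen1 : 1 ≤ ps.length := List.length_pos_iff.2 hne
    have hlen2 : ps.length ≠ 1 := (pvSep_infix_iff pattern.toList).1 hin
    have hdpos : 0 < d := by omega
    have hlen : ps.length = d + 1 := by omega
    rw [hcnt]
    rw [show ((10 : Int) ^ d) = ((10 ^ d : Nat) : Int) by push_cast; ring]
    rw [PySem.List.pyRange_zero_natCast (10 ^ d), List.map_map]
    rw [pvGen_eq_tuples ps hne, ← hd, ← pvRange_pad d, List.map_map, List.map_map]
    apply List.map_congr_left
    intro n hn
    have hnlt : n < 10 ^ d := List.mem_range.1 hn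
    simp only [Function.comp_apply]
    rw [pvZfill_pad d n hnlt hdpos]
    rw [PySem.List.pyRange_zero_natCast d]
    congr 1
    have := pvLoopA ((List.range d).map (fun (k : Nat) => (k : Int))) ps (pvPad d n) []
      (by simp [pvPad_len]) (by rw [pvPad_len]; exact hlen)
      (pvParts_noSep pattern.toList) (pvPad_ok d n)
      (by intro h; have := h.length_le; simp at this)
      (by intro c₀ h; simp at h)
    simp only [List.nil_append] at this
    rw [pvJoin_pvParts] at this
    exact this
  · have hisin : PySem.Chars.isIn ['%', 'd'] pattern.toList = false := by
      rw [← Bool.not_eq_true, PySem.Chars.isIn_iff_infix]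
      exact hin
    rw [if_neg (by simp [hisin])]
    rw [pvParts_of_noSep pattern.toList hin]
    simp [pvGen]

-- ===== VERDICT (by name: the statement is the Claim_ definition above) =====
theorem generate_from_pattern_spec : Claim_equal_generate_from_pattern := by
  intro pattern _
  exact pv_main pattern
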